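-- pv_equiv track=rewrite | github.com/Blackmvmba88/qbit | typing_trainer.py | build_word_bank
-- ===== SOURCE A (Python) =====
-- from typing import Iterable, List, Optional
--
-- def build_word_bank(phrases: Iterable[str]) -> List[str]:
--     bank = []
--     for sentence in phrases:
--         cleaned = ''.join(ch.lower() if ch.isalpha() or ch == ' ' else ' ' for ch in sentence)
--         for word in cleaned.split():
--             if len(word) > 1:  # evita partículas de una sola letra
--                 bank.append(word)
--     return bank
-- ===== SOURCE B (Python) =====
-- def build_word_bank(phrases):
--     bank = []
--     for sentence in phrases:
--         buf = []
--         for ch in sentence: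
--             if ch.isalpha():
--                 buf.append(ch.lower())
--             else:
--                 if len(buf) > 1:
--                     bank.append(''.join(buf))
--                 buf = []
--         if len(buf) > 1:
--             bank.append(''.join(buf))
--     return bank
-- ===== Notes on version B (the rewrite author's own statement) =====
-- stated objective: alternative
-- what changed: Replaces A's build-cleaned-string / split / filter pipeline with a single pass over each sentence's characters maintaining a word buffer that is flushed on every non-alphabetic character and at end of sentence.
import Mathlib
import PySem

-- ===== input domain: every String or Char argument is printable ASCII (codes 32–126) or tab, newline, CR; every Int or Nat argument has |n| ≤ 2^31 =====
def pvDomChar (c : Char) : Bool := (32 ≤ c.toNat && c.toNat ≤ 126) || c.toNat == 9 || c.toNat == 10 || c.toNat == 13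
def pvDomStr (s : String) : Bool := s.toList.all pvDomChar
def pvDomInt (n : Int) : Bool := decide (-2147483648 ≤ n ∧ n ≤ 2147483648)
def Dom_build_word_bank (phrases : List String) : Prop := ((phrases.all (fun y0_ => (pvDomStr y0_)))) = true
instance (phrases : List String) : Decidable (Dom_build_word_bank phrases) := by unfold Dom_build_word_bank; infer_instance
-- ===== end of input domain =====

-- B replaces A's build-cleaned-string/split/filter pipeline with a single character
-- pass per sentence keeping a word buffer flushed on non-alphabetic characters (alternative decomposition, same cost).

-- ===== PORT A =====
-- 'cleaned = ''.join(ch.lower() if ch.isalpha() or ch == ' ' else ' ' for ch in sentence)'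
def pvClean (ch : Char) : Char :=
  if PySem.Chars.isalpha ch || ch == ' ' then PySem.Chars.lowerChar ch else ' '

def build_word_bank (phrases : List String) : List String :=
  phrases.foldl (fun bank sentence =>
    let cleaned : List Char := sentence.toList.map pvClean
    (PySem.Chars.split₀ cleaned).foldl
      (fun bank word => if word.length > 1 then bank ++ [String.mk word] else bank) bank) []

-- ===== PORT B =====
-- 'if len(buf) > 1: bank.append(''.join(buf))'
def pvFlush (bank : List String) (buf : List Char) : List String :=
  if buf.length > 1 then bank ++ [String.mk buf] else bank

-- the inner 'for ch in sentence' loop with state (bank, buf), plus the trailing flush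
def pvScan : List String → List Char → List Char → List String
  | bank, buf, [] => pvFlush bank buf
  | bank, buf, c :: rest =>
    if PySem.Chars.isalpha c then pvScan bank (buf ++ [PySem.Chars.lowerChar c]) rest
    else pvScan (pvFlush bank buf) [] rest

def build_word_bank_alt (phrases : List String) : List String :=
  phrases.foldl (fun bank sentence => pvScan bank [] sentence.toList) []

-- ===== PRECONDITION & SPEC =====
def Spec_build_word_bank (phrases : List String) (out : List String) : Prop := out = build_word_bank_alt phrases
instance (phrases : List String) (out : List String) : Decidable (Spec_build_word_bank phrases out) := by unfold Spec_build_word_bank; infer_instance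

-- ===== CLAIM (what is proved, stated in full; the proofs are below) =====
def Claim_equal_build_word_bank : Prop := ∀ (phrases : List String), Dom_build_word_bank phrases → Spec_build_word_bank phrases (build_word_bank phrases)

-- ===== LEMMAS AND PROOFS =====

lemma char_ofNat_toNat (n : Nat) (h : n < 55296) : (Char.ofNat n).toNat = n := by
  have hv : Nat.isValidChar n := Or.inl h
  simp [Char.ofNat, hv, Char.ofNatAux, Char.toNat]

lemma upper_bounds (c : Char) (h : PySem.Chars.isupper c = true) :
    65 ≤ c.toNat ∧ c.toNat ≤ 90 := by
  simp only [PySem.Chars.isupper, Bool.and_eq_true, decide_eq_true_eq] at h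
  obtain ⟨h1, h2⟩ := h
  rw [Char.le_def] at h1 h2
  rw [UInt32.le_iff_toNat_le] at h1 h2
  exact ⟨h1, h2⟩

lemma lower_bounds (c : Char) (h : PySem.Chars.islower c = true) :
    97 ≤ c.toNat ∧ c.toNat ≤ 122 := by
  simp only [PySem.Chars.islower, Bool.and_eq_true, decide_eq_true_eq] at h
  obtain ⟨h1, h2⟩ := h
  rw [Char.le_def] at h1 h2
  rw [UInt32.le_iff_toNat_le] at h1 h2
  exact ⟨h1, h2⟩

lemma isspace_of_bounds (c : Char) (h1 : 97 ≤ c.toNat) (h2 : c.toNat ≤ 122) :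
    PySem.Chars.isspace c = false := by
  simp only [PySem.Chars.isspace]
  simp only [Bool.or_eq_false_iff, Bool.and_eq_false_iff, decide_eq_false_iff_not]
  omega

lemma isspace_lowerChar_alpha (c : Char) (h : PySem.Chars.isalpha c = true) :
    PySem.Chars.isspace (PySem.Chars.lowerChar c) = false := by
  by_cases hu : PySem.Chars.isupper c = true
  · obtain ⟨h1, h2⟩ := upper_bounds c hu
    have hval : (Char.ofNat (c.toNat + 32)).toNat = c.toNat + 32 :=
      char_ofNat_toNat _ (by omega)
    simp only [PySem.Chars.lowerChar, hu, if_pos]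
    exact isspace_of_bounds _ (by omega) (by omega)
  · have hl : PySem.Chars.islower c = true := by
      simp only [PySem.Chars.isalpha, Bool.or_eq_true] at h
      tauto
    obtain ⟨h1, h2⟩ := lower_bounds c hl
    simp only [PySem.Chars.lowerChar, hu, Bool.false_eq_true]
    exact isspace_of_bounds c h1 h2

lemma isspace_clean_alpha (c : Char) (h : PySem.Chars.isalpha c = true) :
    PySem.Chars.isspace (pvClean c) = false := by
  simp only [pvClean, h, Bool.true_or, if_pos]
  exact isspace_lowerChar_alpha c h

lemma clean_not_alpha (c : Char) (h : PySem.Chars.isalpha c = false) :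
    pvClean c = ' ' := by
  by_cases hsp : c = ' '
  · subst hsp; decide
  · simp [pvClean, h, hsp]

lemma scan_go (s : List Char) (cur : List Char) (acc : List (List Char)) (bank : List String) :
    (PySem.Chars.split₀.go (s.map pvClean) cur acc).foldl
      (fun bank word => if word.length > 1 then bank ++ [String.mk word] else bank) bank
    = pvScan (acc.reverse.foldl
        (fun bank word => if word.length > 1 then bank ++ [String.mk word] else bank) bank)
        cur.reverse s := by
  induction s generalizing cur acc bank with
  | nil =>
    simp only [List.map_nil, PySem.Chars.split₀.go, pvScan, pvFlush]
    by_cases hc : cur = []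
    · simp [hc]
    · simp [List.isEmpty_iff, hc, List.foldl_append]
  | cons c rest ih =>
    simp only [List.map_cons, PySem.Chars.split₀.go]
    by_cases ha : PySem.Chars.isalpha c = true
    · rw [isspace_clean_alpha c ha]
      simp only [Bool.false_eq_true, if_false]
      have : pvClean c :: cur = (cur.reverse ++ [pvClean c]).reverse := by simp
      rw [ih (pvClean c :: cur) acc bank]
      simp only [pvScan, ha, if_pos, List.reverse_cons]
      have hclean : pvClean c = PySem.Chars.lowerChar c := by
        simp [pvClean, ha]
      rw [hclean]
    · rw [clean_not_alpha c (by simpa using ha)]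
      have hsp : PySem.Chars.isspace ' ' = true := by decide
      rw [hsp]
      simp only [if_pos]
      by_cases hc : cur = []
      · subst hc
        simp only [List.isEmpty_nil, if_pos]
        rw [ih [] acc bank]
        simp [pvScan, ha, pvFlush]
      · rw [if_neg (by simpa [List.isEmpty_iff] using hc)]
        rw [ih [] (cur.reverse :: acc) bank]
        simp [pvScan, ha, pvFlush, List.foldl_append]

lemma sentence_eq (bank : List String) (sentence : String) :
    (PySem.Chars.split₀ (sentence.toList.map pvClean)).foldl
      (fun bank word => if word.length > 1 then bank ++ [String.mk word] else bank) bank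
    = pvScan bank [] sentence.toList := by
  have := scan_go sentence.toList [] [] bank
  simpa [PySem.Chars.split₀] using this

-- ===== VERDICT (by name: the statement is the Claim_ definition above) =====
theorem build_word_bank_spec : Claim_equal_build_word_bank := by
  intro phrases _
  unfold Spec_build_word_bank build_word_bank build_word_bank_alt
  have hf : (fun (bank : List String) (sentence : String) =>
      (PySem.Chars.split₀ (sentence.toList.map pvClean)).foldl
        (fun bank word => if word.length > 1 then bank ++ [String.mk word] else bank) bank)
      = fun bank sentence => pvScan bank [] sentence.toList := by
    funext bank sentence
    exact sentence_eq bank sentence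
  simp only [hf]
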